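-- pv_equiv track=rewrite | github.com/Hyeri-hci/ODOCAIagent | backend/agents/diagnosis/tools/onboarding_tasks.py | determine_kind_from_labels
-- ===== SOURCE A (Python) =====
-- from typing import Any, Dict, List, Literal, Optional
--
-- TaskKind = Literal["issue", "doc", "test", "refactor", "meta"]
--
-- def determine_kind_from_labels(labels: List[str]) -> TaskKind:
--     """라벨에서 Task 종류 결정."""
--     labels_lower = {label.lower() for label in labels}
--
--     if labels_lower & {"documentation", "docs"}:
--         return "doc"
--     if labels_lower & {"tests", "testing", "test"}:
--         return "test"
--     if labels_lower & {"refactor", "refactoring", "cleanup"}: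
--         return "refactor"
--
--     return "issue"
-- ===== SOURCE B (Python) =====
-- _RANK = {
--     "documentation": 0, "docs": 0,
--     "tests": 1, "testing": 1, "test": 1,
--     "refactor": 2, "refactoring": 2, "cleanup": 2,
-- }
-- _KINDS = ["doc", "test", "refactor", "issue"]
--
--
-- def determine_kind_from_labels(labels):
--     """라벨에서 Task 종류 결정."""
--     best = 3
--     for label in labels:
--         best = min(best, _RANK.get(label.lower(), 3))
--     return _KINDS[best]
-- ===== Notes on version B (the rewrite author's own statement) =====
-- stated objective: alternative
-- what changed: Three ordered set-intersection branches over a built set of lowered labels are replaced by a single min-tracking scan: each label is looked up in a static keyword-to-priority dict and the best (lowest) rank found selects the kind from a rank-to-kind table, with default rank 3 = 'issue'.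
import Mathlib
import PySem

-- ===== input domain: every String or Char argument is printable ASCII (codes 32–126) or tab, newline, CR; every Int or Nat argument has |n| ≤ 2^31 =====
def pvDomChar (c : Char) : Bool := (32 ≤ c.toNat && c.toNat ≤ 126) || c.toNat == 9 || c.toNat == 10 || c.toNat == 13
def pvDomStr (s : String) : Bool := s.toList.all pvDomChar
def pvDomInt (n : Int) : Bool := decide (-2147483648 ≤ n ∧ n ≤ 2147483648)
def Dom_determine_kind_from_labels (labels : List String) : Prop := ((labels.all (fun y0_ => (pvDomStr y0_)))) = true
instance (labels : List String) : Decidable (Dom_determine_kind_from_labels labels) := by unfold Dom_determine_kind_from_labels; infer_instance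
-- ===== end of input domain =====

-- ===== PORT A =====
-- B replaces A's three set-intersection branches by a single min-rank scan over a static keyword->priority dict (objective: alternative decomposition).
def determine_kind_from_labels (labels : List String) : String :=
  let labels_lower : PySem.Set String := PySem.Set.ofList (labels.map PySem.Str.lower)
  if PySem.Set.inter labels_lower (PySem.Set.ofList ["documentation", "docs"]) ≠ [] then "doc"
  else if PySem.Set.inter labels_lower (PySem.Set.ofList ["tests", "testing", "test"]) ≠ [] then "test"
  else if PySem.Set.inter labels_lower (PySem.Set.ofList ["refactor", "refactoring", "cleanup"]) ≠ [] then "refactor"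
  else "issue"

-- ===== PORT B =====
def pvRank : PySem.Dict String Int :=
  PySem.Dict.ofList [("documentation", 0), ("docs", 0),
                     ("tests", 1), ("testing", 1), ("test", 1),
                     ("refactor", 2), ("refactoring", 2), ("cleanup", 2)]

def pvKinds : List String := ["doc", "test", "refactor", "issue"]

def determine_kind_from_labels_alt (labels : List String) : String :=
  let best : Int := labels.foldl (fun b label => min b (pvRank.getD (PySem.Str.lower label) 3)) 3
  PySem.List.pyGetD pvKinds best ""

-- ===== PRECONDITION & SPEC =====
def Spec_determine_kind_from_labels (labels : List String) (out : String) : Prop := out = determine_kind_from_labels_alt labels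
instance (labels : List String) (out : String) : Decidable (Spec_determine_kind_from_labels labels out) := by unfold Spec_determine_kind_from_labels; infer_instance

-- ===== CLAIM (what is proved, stated in full; the proofs are below) =====
def Claim_equal_determine_kind_from_labels : Prop := ∀ (labels : List String), Dom_determine_kind_from_labels labels → Spec_determine_kind_from_labels labels (determine_kind_from_labels labels)

-- ===== LEMMAS AND PROOFS =====

-- the rank a lowered label contributes in B
def pvR (s : String) : Int := pvRank.getD s 3

lemma pvR_eq (s : String) :
    pvR s = if s = "documentation" ∨ s = "docs" then 0
      else if s = "tests" ∨ s = "testing" ∨ s = "test" then 1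
      else if s = "refactor" ∨ s = "refactoring" ∨ s = "cleanup" then 2
      else 3 := by
  by_cases h1 : s = "documentation"; · subst h1; decide
  by_cases h2 : s = "docs"; · subst h2; decide
  by_cases h3 : s = "tests"; · subst h3; decide
  by_cases h4 : s = "testing"; · subst h4; decide
  by_cases h5 : s = "test"; · subst h5; decide
  by_cases h6 : s = "refactor"; · subst h6; decide
  by_cases h7 : s = "refactoring"; · subst h7; decide
  by_cases h8 : s = "cleanup"; · subst h8; decide
  have hmk : pvRank = PySem.Dict.mk [("documentation", (0 : Int)), ("docs", 0),
      ("tests", 1), ("testing", 1), ("test", 1),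
      ("refactor", 2), ("refactoring", 2), ("cleanup", 2)] := rfl
  have n1 : ("documentation" = s) = False := eq_false (fun e => h1 e.symm)
  have n2 : ("docs" = s) = False := eq_false (fun e => h2 e.symm)
  have n3 : ("tests" = s) = False := eq_false (fun e => h3 e.symm)
  have n4 : ("testing" = s) = False := eq_false (fun e => h4 e.symm)
  have n5 : ("test" = s) = False := eq_false (fun e => h5 e.symm)
  have n6 : ("refactor" = s) = False := eq_false (fun e => h6 e.symm)
  have n7 : ("refactoring" = s) = False := eq_false (fun e => h7 e.symm)
  have n8 : ("cleanup" = s) = False := eq_false (fun e => h8 e.symm)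
  simp [pvR, hmk, PySem.Dict.getD, PySem.Dict.get?, beq_iff_eq,
        n1, n2, n3, n4, n5, n6, n7, n8, h1, h2, h3, h4, h5, h6, h7, h8]

lemma pvR_cases (s : String) : pvR s = 0 ∨ pvR s = 1 ∨ pvR s = 2 ∨ pvR s = 3 := by
  rw [pvR_eq]; split_ifs <;> simp

lemma pvR_eq0 (s : String) : pvR s = 0 ↔ s = "documentation" ∨ s = "docs" := by
  rw [pvR_eq]; split_ifs with hd ht hr
  · exact iff_of_true rfl hd
  · exact iff_of_false (by norm_num) hd
  · exact iff_of_false (by norm_num) hd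
  · exact iff_of_false (by norm_num) hd

lemma pvR_eq1 (s : String) : pvR s = 1 ↔ s = "tests" ∨ s = "testing" ∨ s = "test" := by
  rw [pvR_eq]; split_ifs with hd ht hr
  · exact iff_of_false (by norm_num) (by rcases hd with rfl | rfl <;> decide)
  · exact iff_of_true rfl ht
  · exact iff_of_false (by norm_num) ht
  · exact iff_of_false (by norm_num) ht

lemma pvR_eq2 (s : String) : pvR s = 2 ↔ s = "refactor" ∨ s = "refactoring" ∨ s = "cleanup" := by
  rw [pvR_eq]; split_ifs with hd ht hr
  · exact iff_of_false (by norm_num) (by rcases hd with rfl | rfl <;> decide)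
  · exact iff_of_false (by norm_num) (by rcases ht with rfl | rfl | rfl <;> decide)
  · exact iff_of_true rfl hr
  · exact iff_of_false (by norm_num) hr

-- pushing an accumulator through B's min-fold
lemma pv_fold_min (f : String → Int) (ls : List String) : ∀ (b c : Int),
    ls.foldl (fun b label => min b (f label)) (min b c)
      = min b (ls.foldl (fun b label => min b (f label)) c) := by
  induction ls with
  | nil => intro b c; rfl
  | cons l ls ih =>
      intro b c
      simp only [List.foldl_cons, min_assoc]
      exact ih b (min c (f l))

-- taking the min with one rank, pushed inside the nested-if normal form
lemma pv_min_nested (k : Int) (p0 p1 p2 : Prop)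
    [Decidable p0] [Decidable p1] [Decidable p2]
    (hk : k = 0 ∨ k = 1 ∨ k = 2 ∨ k = 3) :
    min k (if p0 then (0 : Int) else if p1 then 1 else if p2 then 2 else 3)
      = if k = 0 ∨ p0 then 0 else if k = 1 ∨ p1 then 1 else if k = 2 ∨ p2 then 2 else 3 := by
  rcases hk with rfl | rfl | rfl | rfl <;> split_ifs <;> first | decide | tauto

-- characterisation of B's fold as the first-hit priority of A
lemma pv_fold_char (ls : List String) :
    ls.foldl (fun b label => min b (pvR (PySem.Str.lower label))) 3
      = if ∃ l ∈ ls, pvR (PySem.Str.lower l) = 0 then 0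
        else if ∃ l ∈ ls, pvR (PySem.Str.lower l) = 1 then 1
        else if ∃ l ∈ ls, pvR (PySem.Str.lower l) = 2 then 2
        else 3 := by
  induction ls with
  | nil => simp
  | cons l ls ih =>
      have h1 : (l :: ls).foldl (fun b label => min b (pvR (PySem.Str.lower label))) 3
          = min (pvR (PySem.Str.lower l)) (ls.foldl (fun b label => min b (pvR (PySem.Str.lower label))) 3) := by
        simp only [List.foldl_cons]
        rw [min_comm 3 (pvR (PySem.Str.lower l))]
        exact pv_fold_min (fun label => pvR (PySem.Str.lower label)) ls (pvR (PySem.Str.lower l)) 3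
      rw [h1, ih, pv_min_nested _ _ _ _ (pvR_cases (PySem.Str.lower l))]
      simp only [List.exists_mem_cons_iff]

-- A's set-intersection test, as an existential over the labels
lemma pv_inter_ne_nil (ls : List String) (t : List String) :
    (PySem.Set.inter (PySem.Set.ofList (ls.map PySem.Str.lower)) (PySem.Set.ofList t) ≠ [])
      ↔ ∃ l ∈ ls, PySem.Str.lower l ∈ t := by
  rw [← List.isEmpty_eq_false_iff, List.isEmpty_eq_false_iff_exists_mem]
  constructor
  · rintro ⟨y, hy⟩
    rw [PySem.Set.mem_inter] at hy
    obtain ⟨hA, hB⟩ := hy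
    rw [PySem.Set.mem_ofList, List.mem_map] at hA
    rw [PySem.Set.mem_ofList] at hB
    obtain ⟨l, hl, rfl⟩ := hA
    exact ⟨l, hl, hB⟩
  · rintro ⟨l, hl, hm⟩
    refine ⟨PySem.Str.lower l, ?_⟩
    rw [PySem.Set.mem_inter, PySem.Set.mem_ofList, PySem.Set.mem_ofList]
    exact ⟨List.mem_map.mpr ⟨l, hl, rfl⟩, hm⟩

-- ===== VERDICT (by name: the statement is the Claim_ definition above) =====
theorem determine_kind_from_labels_spec : Claim_equal_determine_kind_from_labels := by
  intro ls _
  unfold Spec_determine_kind_from_labels determine_kind_from_labels determine_kind_from_labels_alt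
  have m0 : ∀ l : String, pvR (PySem.Str.lower l) = 0 ↔ PySem.Str.lower l ∈ ["documentation", "docs"] := by
    intro l; rw [pvR_eq0]; simp
  have m1 : ∀ l : String, pvR (PySem.Str.lower l) = 1 ↔ PySem.Str.lower l ∈ ["tests", "testing", "test"] := by
    intro l; rw [pvR_eq1]; simp
  have m2 : ∀ l : String, pvR (PySem.Str.lower l) = 2 ↔ PySem.Str.lower l ∈ ["refactor", "refactoring", "cleanup"] := by
    intro l; rw [pvR_eq2]; simp
  have hfold : ls.foldl (fun b label => min b (pvRank.getD (PySem.Str.lower label) 3)) 3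
      = ls.foldl (fun b label => min b (pvR (PySem.Str.lower label))) 3 := rfl
  simp only [hfold, pv_fold_char]
  by_cases h0 : ∃ l ∈ ls, pvR (PySem.Str.lower l) = 0
  · rw [if_pos h0, if_pos ((pv_inter_ne_nil ls _).mpr (by
      obtain ⟨l, hl, hv⟩ := h0; exact ⟨l, hl, (m0 l).mp hv⟩))]
    rfl
  · have hA0 : ¬ (PySem.Set.inter (PySem.Set.ofList (ls.map PySem.Str.lower)) (PySem.Set.ofList ["documentation", "docs"]) ≠ []) := by
      rw [pv_inter_ne_nil]
      rintro ⟨l, hl, hm⟩; exact h0 ⟨l, hl, (m0 l).mpr hm⟩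
    rw [if_neg h0, if_neg hA0]
    by_cases h1 : ∃ l ∈ ls, pvR (PySem.Str.lower l) = 1
    · rw [if_pos h1, if_pos ((pv_inter_ne_nil ls _).mpr (by
        obtain ⟨l, hl, hv⟩ := h1; exact ⟨l, hl, (m1 l).mp hv⟩))]
      rfl
    · have hA1 : ¬ (PySem.Set.inter (PySem.Set.ofList (ls.map PySem.Str.lower)) (PySem.Set.ofList ["tests", "testing", "test"]) ≠ []) := by
        rw [pv_inter_ne_nil]
        rintro ⟨l, hl, hm⟩; exact h1 ⟨l, hl, (m1 l).mpr hm⟩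
      rw [if_neg h1, if_neg hA1]
      by_cases h2 : ∃ l ∈ ls, pvR (PySem.Str.lower l) = 2
      · rw [if_pos h2, if_pos ((pv_inter_ne_nil ls _).mpr (by
          obtain ⟨l, hl, hv⟩ := h2; exact ⟨l, hl, (m2 l).mp hv⟩))]
        rfl
      · have hA2 : ¬ (PySem.Set.inter (PySem.Set.ofList (ls.map PySem.Str.lower)) (PySem.Set.ofList ["refactor", "refactoring", "cleanup"]) ≠ []) := by
          rw [pv_inter_ne_nil]
          rintro ⟨l, hl, hm⟩; exact h2 ⟨l, hl, (m2 l).mpr hm⟩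
        rw [if_neg h2, if_neg hA2]
        rfl
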